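-- pv_equiv track=rewrite | github.com/elowagroup/corexia-agents | matrix_scanner/app.py | combine_states
-- ===== SOURCE A (Python) =====
-- def combine_states(states):
--     """Blend multiple states into one."""
--     states = [s for s in states if s]
--     if not states:
--         return "Choppy"
--     if all(s == "Bullish" for s in states):
--         return "Bullish"
--     if all(s == "Bearish" for s in states):
--         return "Bearish"
--     if "Choppy" in states:
--         return "Choppy"
--     return "Choppy"
-- ===== SOURCE B (Python) =====
-- def combine_states(states):
--     """Blend multiple states into one."""
--     acc = None
--     for s in states:
--         if not s:
--             continue
--         if s not in ("Bullish", "Bearish"):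
--             return "Choppy"
--         if acc is None:
--             acc = s
--         elif s != acc:
--             return "Choppy"
--     return acc if acc is not None else "Choppy"
-- ===== Notes on version B (the rewrite author's own statement) =====
-- stated objective: alternative
-- what changed: Replaces A's staged whole-list scans (filter, two all() passes, membership test) by a single state-machine pass with an Option accumulator: it tracks the one sentinel seen so far and exits early with 'Choppy' on the first non-sentinel or conflicting state.
import Mathlib
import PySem

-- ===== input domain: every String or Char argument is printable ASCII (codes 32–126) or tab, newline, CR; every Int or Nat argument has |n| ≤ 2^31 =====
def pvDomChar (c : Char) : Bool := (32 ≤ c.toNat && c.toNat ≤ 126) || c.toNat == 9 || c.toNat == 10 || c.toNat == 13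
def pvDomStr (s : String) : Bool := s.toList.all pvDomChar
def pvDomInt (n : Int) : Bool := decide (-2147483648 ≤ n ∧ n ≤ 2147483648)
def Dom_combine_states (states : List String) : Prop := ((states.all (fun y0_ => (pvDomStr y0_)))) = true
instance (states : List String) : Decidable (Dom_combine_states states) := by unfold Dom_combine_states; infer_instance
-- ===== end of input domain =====

-- B replaces A's staged whole-list scans by one recursive pass with an Option accumulator
-- tracking the single sentinel seen so far, exiting early on any conflict (objective: alternative).

-- ===== PORT A =====
def combine_states (states : List String) : String :=
  -- states = [s for s in states if s]  (a string is truthy iff nonempty)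
  let states := states.filter (fun s => s ≠ "")
  if states = [] then "Choppy"
  else if states.all (fun s => s == "Bullish") then "Bullish"
  else if states.all (fun s => s == "Bearish") then "Bearish"
  else if states.contains "Choppy" then "Choppy"
  else "Choppy"

-- ===== PORT B =====
-- Source B's loop over states with the early-returning accumulator acc, as structural recursion
def combineGo : List String → Option String → String
  | [], acc => acc.getD "Choppy"
  | s :: rest, acc =>
    if s = "" then combineGo rest acc
    else if s ≠ "Bullish" ∧ s ≠ "Bearish" then "Choppy"
    else match acc with
      | none => combineGo rest (some s)
      | some a => if s ≠ a then "Choppy" else combineGo rest (some a)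

def combine_states_alt (states : List String) : String :=
  combineGo states none

-- ===== PRECONDITION & SPEC =====
def Spec_combine_states (states : List String) (out : String) : Prop := out = combine_states_alt states
instance (states : List String) (out : String) : Decidable (Spec_combine_states states out) := by unfold Spec_combine_states; infer_instance

-- ===== CLAIM =====
def Claim_equal_combine_states : Prop := ∀ (states : List String), Dom_combine_states states → Spec_combine_states states (combine_states states)

-- ===== LEMMAS AND PROOFS =====

-- once the accumulator holds a sentinel a, go returns a iff every remaining truthy state equals a
theorem combineGo_some (a : String) (ha : a = "Bullish" ∨ a = "Bearish") :
    ∀ states : List String,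
      combineGo states (some a) =
        if (states.filter (fun s => s ≠ "")).all (fun s => s == a) then a else "Choppy" := by
  intro states
  induction states with
  | nil => simp [combineGo]
  | cons s rest ih =>
    by_cases hs : s = ""
    · simp [combineGo, hs, ih]
    · by_cases hsent : s ≠ "Bullish" ∧ s ≠ "Bearish"
      · have hne : s ≠ a := by rcases ha with rfl | rfl; exact hsent.1; exact hsent.2
        simp [combineGo, hs, hsent, hne]
      · by_cases hsa : s = a
        · subst hsa
          simp [combineGo, hs, hsent, ih]
        · simp [combineGo, hs, hsent, hsa]

-- go from the empty accumulator computes A's staged answer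
theorem combineGo_none :
    ∀ states : List String,
      combineGo states none =
        (let l := states.filter (fun s => s ≠ "")
         if l = [] then "Choppy"
         else if l.all (fun s => s == "Bullish") then "Bullish"
         else if l.all (fun s => s == "Bearish") then "Bearish"
         else "Choppy") := by
  intro states
  induction states with
  | nil => simp [combineGo]
  | cons s rest ih =>
    by_cases hs : s = ""
    · simpa [combineGo, hs, List.filter_cons] using ih
    · by_cases hsent : s ≠ "Bullish" ∧ s ≠ "Bearish"
      · simp [combineGo, hs, hsent]
      · rcases not_and_or.mp hsent with hB | hE
        · have hsB : s = "Bullish" := not_not.mp hB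
          subst hsB
          rw [show combineGo ("Bullish" :: rest) none = combineGo rest (some "Bullish") by
            simp [combineGo]]
          rw [combineGo_some "Bullish" (Or.inl rfl) rest]
          simp
        · have hsE : s = "Bearish" := not_not.mp hE
          subst hsE
          rw [show combineGo ("Bearish" :: rest) none = combineGo rest (some "Bearish") by
            simp [combineGo]]
          rw [combineGo_some "Bearish" (Or.inr rfl) rest]
          simp

-- ===== VERDICT =====
theorem combine_states_spec : Claim_equal_combine_states := by
  intro states _
  unfold Spec_combine_states combine_states combine_states_alt
  rw [combineGo_none]
  dsimp only
  split_ifs <;> rfl
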